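-- pv_equiv track=rewrite | github.com/Boss-Li12/Py_votingSystem | voting_systems_finished_updated1028.py | get_lowest_not_removed
-- ===== SOURCE A (Python) =====
-- from typing import List
--
-- PARTY_ORDER = ['CPC', 'GREEN', 'LIBERAL', 'NDP']
--
-- def get_lowest_not_removed(votes: List[int], removed_parties: List[str]) -> str:
--     """Return the name of the party with the lowest number of votes that is
--     not in removed_parties. votes is ordered by PARTY_ORDER.
--
--     Pre-condition: len(removed_parties) < len(PARTY_ORDER)
--                    There is at least one party that has not been removed yet.
--                    Elements of votes >= 0.
--
--     >>> get_lowest_not_removed([16, 100, 4, 200], [])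
--     'LIBERAL'
--     >>> get_lowest_not_removed([16, 100, 4, 200], ['LIBERAL', 'CPC'])
--     'GREEN'
--     >>> get_lowest_not_removed([10, 10, 10, 10], ['CPC'])
--     'GREEN'
--     """
--     party_order = PARTY_ORDER[:]
--     dict = {}
--     for index, party in enumerate(party_order):
--         dict[party] = votes[index]
--     new_party_order = []
--
--     # get the new_party_order after removing
--     for party in party_order:
--         if party not in removed_parties:
--             new_party_order.append(party)
--
--     # get the lowest one in new_party_order
--     lowest_vote = 0xffffffff
--     for party in new_party_order:
--         if dict[party] < lowest_vote:
--             lowest_vote = dict[party]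
--     for party in new_party_order:
--         if dict[party] == lowest_vote:
--             return party
-- ===== SOURCE B (Python) =====
-- PARTY_ORDER = ['CPC', 'GREEN', 'LIBERAL', 'NDP']
--
-- def get_lowest_not_removed(votes, removed_parties):
--     best = None  # (party, vote) of the currently lowest eligible party
--     for i, party in enumerate(PARTY_ORDER):
--         if party not in removed_parties:
--             v = votes[i]
--             if best is None or v < best[1]:
--                 best = (party, v)
--     return best[0]
-- ===== Notes on version B (the rewrite author's own statement) =====
-- stated objective: simpler
-- what changed: Single pass over enumerate(PARTY_ORDER) tracking only the best (party, vote) pair with a strict '<' comparison, replacing A's dict construction, filtered list, separate min scan and separate argmin scan.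
-- outside the precondition, e.g. on get_lowest_not_removed([6, 6, 6, 5, 5], ['CPC', 'CPC', 'NDP', 'GREEN', 'LIBERAL']): A returns None, B raises TypeError
import Mathlib
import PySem

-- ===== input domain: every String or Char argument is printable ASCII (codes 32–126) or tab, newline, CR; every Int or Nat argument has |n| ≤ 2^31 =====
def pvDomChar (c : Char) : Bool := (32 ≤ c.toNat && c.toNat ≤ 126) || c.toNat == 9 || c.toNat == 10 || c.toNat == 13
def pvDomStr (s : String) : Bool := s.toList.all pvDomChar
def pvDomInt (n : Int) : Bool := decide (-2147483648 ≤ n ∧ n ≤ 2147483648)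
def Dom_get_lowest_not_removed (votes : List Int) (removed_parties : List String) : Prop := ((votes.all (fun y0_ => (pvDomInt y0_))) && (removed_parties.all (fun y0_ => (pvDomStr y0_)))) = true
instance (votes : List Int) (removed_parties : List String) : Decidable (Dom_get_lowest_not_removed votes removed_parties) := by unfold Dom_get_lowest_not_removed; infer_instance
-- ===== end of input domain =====

-- B is a single pass over PARTY_ORDER tracking the best (party, vote) pair; A builds a dict,
-- a filtered list, and does separate min and argmin scans.  Objective: simpler.

-- ===== PORT A =====
def pvPartyOrder : List String := ["CPC", "GREEN", "LIBERAL", "NDP"]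

-- A, step for step: dict[party] = votes[index]; filtered new_party_order; min scan; argmin scan.
-- votes[index] would raise IndexError when votes is shorter than 4, and the final loop can fall
-- off the end returning None; both are modelled by the "" default and excluded by Pre_.
def get_lowest_not_removed (votes : List Int) (removed_parties : List String) : String :=
  let d : PySem.Dict String Int :=
    (PySem.List.enumerate pvPartyOrder).foldl
      (fun d ip => d.insert ip.2 ((PySem.List.pyGet? votes ip.1).getD 0)) PySem.Dict.empty
  let new_party_order : List String :=
    pvPartyOrder.foldl (fun acc p => if removed_parties.contains p then acc else acc ++ [p]) ([] : List String)
  let lowest_vote : Int :=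
    new_party_order.foldl (fun lv p => if d.getD p 0 < lv then d.getD p 0 else lv) 4294967295
  (new_party_order.find? (fun p => d.getD p 0 == lowest_vote)).getD ""

-- ===== PORT B =====
-- B, step for step: one fold over enumerate(PARTY_ORDER) carrying best = None | (party, vote).
-- glnrUpdate is the body of Source B's "if best is None or v < best[1]: best = (party, v)";
-- glnrResult is the final "return best[0]" ("" models the None case, excluded by Pre_).
def glnrUpdate (p : String) (v : Int) : Option (String × Int) → Option (String × Int)
  | none => some (p, v)
  | some bv => if v < bv.2 then some (p, v) else some bv

def glnrResult : Option (String × Int) → String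
  | none => ""
  | some bv => bv.1

def get_lowest_not_removed_alt (votes : List Int) (removed_parties : List String) : String :=
  glnrResult
    ((PySem.List.enumerate pvPartyOrder).foldl
      (fun best ip =>
        if removed_parties.contains ip.2 then best
        else glnrUpdate ip.2 ((PySem.List.pyGet? votes ip.1).getD 0) best)
      none)

-- ===== PRECONDITION & SPEC =====
-- Pre_ excludes exactly the inputs on which the Python A does not return a str:
-- votes shorter than PARTY_ORDER (votes[index] raises IndexError) and all four parties
-- removed (A falls off the end and returns None).
def Pre_get_lowest_not_removed (votes : List Int) (removed_parties : List String) : Prop :=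
  4 ≤ votes.length ∧ (pvPartyOrder.any (fun p => !removed_parties.contains p)) = true
instance (votes : List Int) (removed_parties : List String) : Decidable (Pre_get_lowest_not_removed votes removed_parties) := by unfold Pre_get_lowest_not_removed; infer_instance

def pvWitness_get_lowest_not_removed : List Int × List String := ([16, 100, 4, 200], ["LIBERAL", "CPC"])

def Spec_get_lowest_not_removed (votes : List Int) (removed_parties : List String) (out : String) : Prop := out = get_lowest_not_removed_alt votes removed_parties
instance (votes : List Int) (removed_parties : List String) (out : String) : Decidable (Spec_get_lowest_not_removed votes removed_parties out) := by unfold Spec_get_lowest_not_removed; infer_instance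

-- ===== CLAIM (what is proved, stated in full; the proofs are below) =====
def Claim_equal_get_lowest_not_removed : Prop := ∀ (votes : List Int) (removed_parties : List String), Dom_get_lowest_not_removed votes removed_parties → Pre_get_lowest_not_removed votes removed_parties → Spec_get_lowest_not_removed votes removed_parties (get_lowest_not_removed votes removed_parties)

-- ===== LEMMAS AND PROOFS =====

theorem find?_eval {f : String → Int} {m : Int} (a : String) (l : List String) :
    List.find? (fun p => f p == m) (a :: l)
      = if f a = m then some a else List.find? (fun p => f p == m) l := by
  by_cases h : f a = m <;> simp [List.find?_cons_of_pos, List.find?_cons_of_neg, h]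

theorem glnrUpdate_none (p : String) (v : Int) : glnrUpdate p v none = some (p, v) := rfl

theorem glnrUpdate_some (p : String) (v : Int) (bv : String × Int) :
    glnrUpdate p v (some bv) = if v < bv.2 then some (p, v) else some bv := rfl

theorem glnrResult_none : glnrResult none = "" := rfl

theorem glnrResult_some (bv : String × Int) : glnrResult (some bv) = bv.1 := rfl

theorem glnrUpdate_ite (p : String) (v : Int) (c : Prop) [Decidable c]
    (a b : Option (String × Int)) :
    glnrUpdate p v (if c then a else b) = if c then glnrUpdate p v a else glnrUpdate p v b :=
  apply_ite _ _ _ _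

theorem glnrResult_ite (c : Prop) [Decidable c] (a b : Option (String × Int)) :
    glnrResult (if c then a else b) = if c then glnrResult a else glnrResult b :=
  apply_ite _ _ _ _

set_option maxHeartbeats 2000000 in
theorem get_lowest_main (v0 v1 v2 v3 : Int) (rest : List Int) (removed_parties : List String)
    (h0 : v0 < 4294967295) (h1 : v1 < 4294967295)
    (h2 : v2 < 4294967295) (h3 : v3 < 4294967295) :
    get_lowest_not_removed (v0 :: v1 :: v2 :: v3 :: rest) removed_parties
      = get_lowest_not_removed_alt (v0 :: v1 :: v2 :: v3 :: rest) removed_parties := by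
  have g0 : PySem.List.pyGet? (v0 :: v1 :: v2 :: v3 :: rest) 0 = some v0 :=
    PySem.List.pyGet?_zero_cons v0 _
  have g1 : PySem.List.pyGet? (v0 :: v1 :: v2 :: v3 :: rest) 1 = some v1 := by
    rw [show (1:Int) = ((1:Nat):Int) from rfl, PySem.List.pyGet?_natCast]; rfl
  have g2 : PySem.List.pyGet? (v0 :: v1 :: v2 :: v3 :: rest) 2 = some v2 := by
    rw [show (2:Int) = ((2:Nat):Int) from rfl, PySem.List.pyGet?_natCast]; rfl
  have g3 : PySem.List.pyGet? (v0 :: v1 :: v2 :: v3 :: rest) 3 = some v3 := by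
    rw [show (3:Int) = ((3:Nat):Int) from rfl, PySem.List.pyGet?_natCast]; rfl
  cases c0 : removed_parties.contains "CPC" <;>
  cases c1 : removed_parties.contains "GREEN" <;>
  cases c2 : removed_parties.contains "LIBERAL" <;>
  cases c3 : removed_parties.contains "NDP" <;>
    simp only [get_lowest_not_removed, get_lowest_not_removed_alt, pvPartyOrder,
      PySem.List.enumerate_cons, PySem.List.enumerate_nil, List.foldl,
      show ((0:Int)+1) = 1 from rfl, show ((1:Int)+1) = 2 from rfl,
      show ((2:Int)+1) = 3 from rfl, g0, g1, g2, g3, Option.getD_some, c0, c1, c2, c3,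
      Bool.false_eq_true, Bool.true_eq_false, if_true, if_false, ite_true, ite_false,
      List.cons_append, List.nil_append, glnrUpdate_ite, glnrResult_ite, glnrUpdate_none, glnrUpdate_some, glnrResult_none, glnrResult_some,
      PySem.Dict.getD_insert_self,
      PySem.Dict.getD_insert_of_ne _ _ _ (by decide : ("CPC":String) ≠ "GREEN"),
      PySem.Dict.getD_insert_of_ne _ _ _ (by decide : ("CPC":String) ≠ "LIBERAL"),
      PySem.Dict.getD_insert_of_ne _ _ _ (by decide : ("CPC":String) ≠ "NDP"),
      PySem.Dict.getD_insert_of_ne _ _ _ (by decide : ("GREEN":String) ≠ "LIBERAL"),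
      PySem.Dict.getD_insert_of_ne _ _ _ (by decide : ("GREEN":String) ≠ "NDP"),
      PySem.Dict.getD_insert_of_ne _ _ _ (by decide : ("LIBERAL":String) ≠ "NDP"),
      find?_eval, List.find?_nil] <;>
    first | rfl | (split_ifs <;> first | rfl | omega)

-- ===== VERDICT (by name: the statement is the Claim_ definition above) =====
theorem get_lowest_not_removed_spec : Claim_equal_get_lowest_not_removed := by
  intro votes removed_parties hdom hpre
  obtain ⟨hlen, _hne⟩ := hpre
  match votes, hlen, hdom with
  | v0 :: v1 :: v2 :: v3 :: rest, _, hdom => ?_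
  simp only [Dom_get_lowest_not_removed, List.all_cons, Bool.and_eq_true, pvDomInt,
    decide_eq_true_eq] at hdom
  exact get_lowest_main v0 v1 v2 v3 rest removed_parties
    (by omega) (by omega) (by omega) (by omega)
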